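-- pv_equiv track=rewrite | github.com/hieuqng26/learning | services/server/project/orelab/xml_generators/sensitivity.py | _get_instruments_for_tenors
-- ===== SOURCE A (Python) =====
-- from typing import Dict, List, Optional, Any
--
-- def _get_instruments_for_tenors(
--     tenors: List[str], default_instruments: List[str]
-- ) -> List[str]:
--     """
--     Generate instrument list matching tenor count.
--
--     Uses the default pattern and extends/cycles to match tenor count.
--
--     Args:
--         tenors: List of tenor strings
--         default_instruments: Default instrument pattern
--
--     Returns:
--         List of instruments matching tenor count
--     """
--     if len(default_instruments) >= len(tenors):
--         return default_instruments[:len(tenors)]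
--
--     # Repeat pattern to fill
--     instruments = []
--     for i, tenor in enumerate(tenors):
--         instruments.append(default_instruments[i % len(default_instruments)])
--
--     return instruments
-- ===== SOURCE B (Python) =====
-- def _get_instruments_for_tenors(tenors, default_instruments):
--     if len(default_instruments) >= len(tenors):
--         return default_instruments[:len(tenors)]
--     # ceiling division: number of copies of the pattern needed to cover all tenors
--     reps = -(-len(tenors) // len(default_instruments))
--     return (default_instruments * reps)[:len(tenors)]
-- ===== Notes on version B (the rewrite author's own statement) =====
-- stated objective: simpler
-- what changed: Replaces the per-element modulo-indexing loop with ceiling-division list multiplication plus one slice; Pre_ excludes empty default_instruments with non-empty tenors, where both A and B raise ZeroDivisionError.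
import Mathlib
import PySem

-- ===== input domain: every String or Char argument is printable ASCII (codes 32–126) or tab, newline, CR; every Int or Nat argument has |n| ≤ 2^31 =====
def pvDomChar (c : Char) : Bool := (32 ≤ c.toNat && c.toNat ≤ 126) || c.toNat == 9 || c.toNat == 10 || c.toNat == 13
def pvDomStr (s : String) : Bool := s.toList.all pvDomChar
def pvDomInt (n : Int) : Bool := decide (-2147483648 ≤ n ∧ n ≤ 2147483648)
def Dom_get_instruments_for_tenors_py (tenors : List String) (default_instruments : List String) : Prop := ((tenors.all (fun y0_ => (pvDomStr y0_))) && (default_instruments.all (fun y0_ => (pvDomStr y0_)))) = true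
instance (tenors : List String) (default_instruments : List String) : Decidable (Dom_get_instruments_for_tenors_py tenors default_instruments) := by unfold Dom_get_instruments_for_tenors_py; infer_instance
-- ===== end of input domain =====

-- B replaces A's per-element modulo-indexing loop with ceiling-division list
-- repetition plus one slice (objective: simpler).

-- ===== PORT A =====
def get_instruments_for_tenors_py (tenors : List String) (default_instruments : List String) : List String :=
  if default_instruments.length ≥ tenors.length then
    PySem.List.slice default_instruments none (some (tenors.length : Int))
  else
    -- for i, tenor in enumerate(tenors): instruments.append(default_instruments[i % len(default_instruments)])
    -- the index i % n is nonnegative and < n whenever n > 0 (guaranteed by Pre_), so pyGetD is exact here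
    (PySem.List.enumerate tenors).foldl
      (fun acc p =>
        acc ++ [PySem.List.pyGetD default_instruments
          (PySem.Int.mod p.1 (default_instruments.length : Int)) ""]) []

-- ===== PORT B =====
def get_instruments_for_tenors_py_alt (tenors : List String) (default_instruments : List String) : List String :=
  if default_instruments.length ≥ tenors.length then
    PySem.List.slice default_instruments none (some (tenors.length : Int))
  else
    -- reps = -(-len(tenors) // len(default_instruments))
    let reps : Int :=
      -(PySem.Int.floordiv (-(tenors.length : Int)) (default_instruments.length : Int))
    -- (default_instruments * reps)[:len(tenors)]
    PySem.List.slice (PySem.List.pyRepeat default_instruments reps) none (some (tenors.length : Int))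

-- ===== PRECONDITION & SPEC =====
-- Pre_ excludes exactly the inputs on which A raises ZeroDivisionError (empty
-- default_instruments with non-empty tenors); B raises ZeroDivisionError there too.
def Pre_get_instruments_for_tenors_py (tenors : List String) (default_instruments : List String) : Prop :=
  default_instruments ≠ [] ∨ tenors = []
instance (tenors : List String) (default_instruments : List String) : Decidable (Pre_get_instruments_for_tenors_py tenors default_instruments) := by unfold Pre_get_instruments_for_tenors_py; infer_instance

def pvWitness_get_instruments_for_tenors_py : List String × List String :=
  (["1Y", "2Y", "5Y"], ["DEP", "IRS"])

def Spec_get_instruments_for_tenors_py (tenors : List String) (default_instruments : List String) (out : List String) : Prop := out = get_instruments_for_tenors_py_alt tenors default_instruments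
instance (tenors : List String) (default_instruments : List String) (out : List String) : Decidable (Spec_get_instruments_for_tenors_py tenors default_instruments out) := by unfold Spec_get_instruments_for_tenors_py; infer_instance

-- ===== CLAIM (what is proved, stated in full; the proofs are below) =====
def Claim_equal_get_instruments_for_tenors_py : Prop := ∀ (tenors : List String) (default_instruments : List String), Dom_get_instruments_for_tenors_py tenors default_instruments → Pre_get_instruments_for_tenors_py tenors default_instruments → Spec_get_instruments_for_tenors_py tenors default_instruments (get_instruments_for_tenors_py tenors default_instruments)

-- ===== LEMMAS AND PROOFS =====

-- Element i of the m-fold concatenation of d is d[i % d.length] (for i < m * d.length).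
lemma flatten_replicate_getElem? {α : Type} (d : List α) (hn : d ≠ []) :
    ∀ (m i : Nat), i < m * d.length →
      (List.flatten (List.replicate m d))[i]? = d[i % d.length]? := by
  intro m
  induction m with
  | zero => intro i h; omega
  | succ m ih =>
    intro i h
    have hn' : 0 < d.length := List.length_pos_iff.mpr hn
    rw [List.replicate_succ, List.flatten_cons, List.getElem?_append]
    by_cases hi : i < d.length
    · simp [hi, Nat.mod_eq_of_lt hi]
    · rw [if_neg (by omega)]
      rw [Nat.succ_mul] at h
      rw [ih (i - d.length) (by omega)]
      have : i % d.length = (i - d.length) % d.length := by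
        conv_lhs => rw [show i = (i - d.length) + d.length by omega]
        exact Nat.add_mod_right _ _
      rw [this]

lemma ports_agree (t d : List String) (hpre : d ≠ [] ∨ t = []) :
    get_instruments_for_tenors_py t d = get_instruments_for_tenors_py_alt t d := by
  unfold get_instruments_for_tenors_py get_instruments_for_tenors_py_alt
  by_cases hge : d.length ≥ t.length
  · simp [hge]
  · rw [if_neg hge, if_neg hge]
    rw [not_le] at hge
    have hn : 0 < d.length := by
      rcases hpre with h | h
      · exact List.length_pos_iff.mpr h
      · subst h; simp at hge
    have hd : d ≠ [] := List.length_pos_iff.mp hn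
    -- A side: the append loop is a map over the index range
    rw [PySem.List.foldl_append_singleton_eq_map, List.nil_append,
        PySem.List.enumerate_eq_map_pyRange t "", List.map_map]
    have hTlen : PySem.List.len t = (t.length : Int) := by simp [PySem.List.len]
    rw [hTlen, PySem.List.pyRange_zero_natCast, List.map_map]
    -- B side: q copies of d cover all t.length positions
    set q : Int := -(PySem.Int.floordiv (-(t.length : Int)) (d.length : Int)) with hq
    have hb : ((q - 1) * d.length < (t.length : Int)) ∧ ((t.length : Int) ≤ q * d.length) :=
      (PySem.Int.neg_floordiv_neg_eq_iff_of_pos (by exact_mod_cast hn)).mp hq.symm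
    have hqpos : 0 < q := by nlinarith [hb.1, hb.2, (by exact_mod_cast hge : (d.length:Int) < t.length)]
    have hq' : (q.toNat : Int) = q := Int.toNat_of_nonneg hqpos.le
    have hcov : t.length ≤ q.toNat * d.length := by
      have h2 := hb.2
      rw [← hq'] at h2
      exact_mod_cast h2
    rw [PySem.List.slice_to_natCast]
    show _ = List.take t.length (PySem.List.pyRepeat d q)
    have hrep : PySem.List.pyRepeat d q = List.flatten (List.replicate q.toNat d) := rfl
    rw [hrep]
    apply List.ext_getElem?
    intro i
    rw [List.getElem?_take]
    by_cases hi : i < t.length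
    · rw [if_pos hi, flatten_replicate_getElem? d hd q.toNat i (by
        calc i < t.length := hi
          _ ≤ q.toNat * d.length := hcov)]
      rw [List.getElem?_map]
      have hr : (List.range t.length)[i]? = some i := by simp [hi]
      rw [hr]
      simp only [Option.map_some, Function.comp_apply]
      have hmod : i % d.length < d.length := Nat.mod_lt _ hn
      rw [PySem.Int.mod_natCast, PySem.List.pyGetD_natCast]
      simp [List.getD_eq_getElem?_getD, List.getElem?_eq_getElem hmod]
    · rw [if_neg hi]
      simp [Nat.not_lt.mp hi]

-- ===== VERDICT (by name: the statement is the Claim_ definition above) =====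
theorem get_instruments_for_tenors_py_spec : Claim_equal_get_instruments_for_tenors_py := by
  intro t d _ hpre
  unfold Spec_get_instruments_for_tenors_py
  exact ports_agree t d hpre
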